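-- pv_equiv track=rewrite | github.com/igalarzab/progcontests | codejam/2012-dancing-googlers/sol.py | solve
-- ===== SOURCE A (Python) =====
-- def solve(surprising, minimum, marks):
--     awesome_googlers = 0
--
--     for mark in marks:
--         base, rest = (mark // 3, mark % 3)
--
--         if rest == 0:
--             if base >= minimum:
--                 awesome_googlers += 1
--             elif base > 0 and (base + 1) >= minimum and surprising:
--                 surprising -= 1
--                 awesome_googlers += 1
--         elif rest == 1:
--             if (base + 1) >= minimum:
--                 awesome_googlers += 1
--         elif rest == 2:
--             if (base + 1) >= minimum:
--                 awesome_googlers += 1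
--             elif (base + 2) >= minimum and surprising:
--                 surprising -= 1
--                 awesome_googlers += 1
--
--     return awesome_googlers
-- ===== SOURCE B (Python) =====
-- def solve(surprising, minimum, marks):
--     # Threshold arithmetic instead of per-mark case analysis on mark % 3:
--     # a mark qualifies plainly iff mark >= 3*minimum - 2, and the only two
--     # mark VALUES that a surprise can rescue are 3*minimum - 4 and (when
--     # minimum >= 2) 3*minimum - 3; count those values directly.
--     plain_threshold = 3 * minimum - 2
--     plain = sum(1 for m in marks if m >= plain_threshold)
--     rescuable = marks.count(plain_threshold - 2)
--     if minimum >= 2: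
--         rescuable += marks.count(plain_threshold - 1)
--     return plain + min(surprising, rescuable)
-- ===== Notes on version B (the rewrite author's own statement) =====
-- stated objective: alternative
-- what changed: Replaces A's per-mark mod-3 branch ladder with an in-loop surprise-budget decrement by pure threshold arithmetic: count marks >= 3*minimum-2 as plain, count occurrences of the only two rescuable mark values 3*minimum-4 and (when minimum>=2) 3*minimum-3 with list.count, and apply the budget once at the end as plain + min(surprising, rescuable); no mod/divmod classification at all.
-- outside the precondition, e.g. on solve(-1, 5, [10, 10, 10]): A returns 0, B returns -1
import Mathlib
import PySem

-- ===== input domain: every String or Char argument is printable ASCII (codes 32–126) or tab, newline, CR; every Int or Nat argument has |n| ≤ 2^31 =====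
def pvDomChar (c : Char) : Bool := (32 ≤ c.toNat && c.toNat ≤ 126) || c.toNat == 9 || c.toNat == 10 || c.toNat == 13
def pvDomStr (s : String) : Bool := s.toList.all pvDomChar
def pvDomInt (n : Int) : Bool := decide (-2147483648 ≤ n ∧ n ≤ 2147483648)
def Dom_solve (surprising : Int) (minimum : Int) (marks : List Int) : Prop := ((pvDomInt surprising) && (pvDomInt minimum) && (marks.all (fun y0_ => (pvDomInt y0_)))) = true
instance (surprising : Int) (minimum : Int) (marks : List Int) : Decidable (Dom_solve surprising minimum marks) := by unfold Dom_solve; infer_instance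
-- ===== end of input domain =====

-- B replaces A's per-mark mod-3 branch ladder with in-loop budget decrement by pure
-- threshold arithmetic: count marks ≥ 3*minimum-2, count the exact rescuable values
-- 3*minimum-4 and 3*minimum-3, and apply the budget once via min (objective: alternative).

-- ===== PORT A =====
-- loop state: (surprising, awesome_googlers); 'if surprising' = st.1 ≠ 0
def solveStepA (minimum : Int) (st : Int × Int) (mark : Int) : Int × Int :=
  if PySem.Int.mod mark 3 = 0 then
    if PySem.Int.floordiv mark 3 ≥ minimum then (st.1, st.2 + 1)
    else if PySem.Int.floordiv mark 3 > 0 ∧ PySem.Int.floordiv mark 3 + 1 ≥ minimum ∧ st.1 ≠ 0 then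
      (st.1 - 1, st.2 + 1)
    else st
  else if PySem.Int.mod mark 3 = 1 then
    if PySem.Int.floordiv mark 3 + 1 ≥ minimum then (st.1, st.2 + 1) else st
  else if PySem.Int.mod mark 3 = 2 then
    if PySem.Int.floordiv mark 3 + 1 ≥ minimum then (st.1, st.2 + 1)
    else if PySem.Int.floordiv mark 3 + 2 ≥ minimum ∧ st.1 ≠ 0 then (st.1 - 1, st.2 + 1)
    else st
  else st

def solve (surprising : Int) (minimum : Int) (marks : List Int) : Int :=
  (marks.foldl (solveStepA minimum) (surprising, 0)).2

-- ===== PORT B =====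
-- Source B: plain = sum(1 for m in marks if m >= plain_threshold) (a countP);
--       rescuable via marks.count of the two rescuable values; budget applied by min.
def solve_alt (surprising : Int) (minimum : Int) (marks : List Int) : Int :=
  let plainThreshold := 3 * minimum - 2
  let plain : Int := (marks.countP (fun m => decide (m ≥ plainThreshold)) : Int)
  let rescuable : Int := (PySem.List.count marks (plainThreshold - 2) : Int)
  let rescuable : Int :=
    if minimum ≥ 2 then rescuable + (PySem.List.count marks (plainThreshold - 1) : Int)
    else rescuable
  plain + min surprising rescuable

-- ===== PRECONDITION & SPEC =====
-- Pre_ excludes negative surprising, a malformed (negative) budget count outside the task's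
-- natural domain: A's truthiness test treats a negative budget as inexhaustible there.
def Pre_solve (surprising : Int) (minimum : Int) (marks : List Int) : Prop := 0 ≤ surprising
instance (surprising : Int) (minimum : Int) (marks : List Int) : Decidable (Pre_solve surprising minimum marks) := by unfold Pre_solve; infer_instance
def pvWitness_solve : Int × Int × List Int := (1, 5, [13, 12, 10])

def Spec_solve (surprising : Int) (minimum : Int) (marks : List Int) (out : Int) : Prop := out = solve_alt surprising minimum marks
instance (surprising : Int) (minimum : Int) (marks : List Int) (out : Int) : Decidable (Spec_solve surprising minimum marks out) := by unfold Spec_solve; infer_instance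

-- ===== CLAIM (what is proved, stated in full; the proofs are below) =====
def Claim_equal_solve : Prop := ∀ (surprising : Int) (minimum : Int) (marks : List Int), Dom_solve surprising minimum marks → Pre_solve surprising minimum marks → Spec_solve surprising minimum marks (solve surprising minimum marks)

-- ===== LEMMAS AND PROOFS =====

-- proof-side tallies: plainly-qualifying marks and surprise-rescuable marks
def Pcnt (minimum : Int) (marks : List Int) : Int :=
  (marks.countP (fun x => decide (3 * minimum - 2 ≤ x)) : Int)
def Rcnt (minimum : Int) (marks : List Int) : Int :=
  (marks.countP (fun x => decide (x = 3 * minimum - 4 ∨ (x = 3 * minimum - 3 ∧ 2 ≤ minimum))) : Int)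

theorem Pcnt_cons (minimum x : Int) (xs : List Int) :
    Pcnt minimum (x :: xs) = Pcnt minimum xs + (if 3 * minimum - 2 ≤ x then 1 else 0) := by
  simp only [Pcnt, List.countP_cons, decide_eq_true_eq]
  split_ifs with h <;> push_cast <;> ring

theorem Rcnt_cons (minimum x : Int) (xs : List Int) :
    Rcnt minimum (x :: xs) = Rcnt minimum xs +
      (if x = 3 * minimum - 4 ∨ (x = 3 * minimum - 3 ∧ 2 ≤ minimum) then 1 else 0) := by
  simp only [Rcnt, List.countP_cons, decide_eq_true_eq]
  split_ifs with h <;> push_cast <;> ring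

theorem Rcnt_nonneg (minimum : Int) (marks : List Int) : 0 ≤ Rcnt minimum marks := by
  simp [Rcnt]

-- mod/floordiv facts
theorem mod3_range (mark : Int) : 0 ≤ PySem.Int.mod mark 3 ∧ PySem.Int.mod mark 3 < 3 := by
  rw [PySem.Int.mod_eq_emod_of_pos (by norm_num)]
  exact ⟨Int.emod_nonneg mark (by norm_num), Int.emod_lt_of_pos mark (by norm_num)⟩

-- A's step, classified by the two threshold conditions of B
theorem stepA_classify (minimum s c x : Int) :
    solveStepA minimum (s, c) x =
      (if 3 * minimum - 2 ≤ x then (s, c + 1)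
       else if x = 3 * minimum - 4 ∨ (x = 3 * minimum - 3 ∧ 2 ≤ minimum) then
         (if s ≠ 0 then (s - 1, c + 1) else (s, c))
       else (s, c)) := by
  have hr := mod3_range x
  have hfm := PySem.Int.floordiv_mul_add_mod x 3
  unfold solveStepA
  split_ifs <;> first | rfl | omega

-- Main loop invariant: A's count = plain tally + min(budget, rescuable tally).
theorem loop_invariant (minimum : Int) (marks : List Int) :
    ∀ s c : Int, 0 ≤ s →
      (marks.foldl (solveStepA minimum) (s, c)).2 =
        c + Pcnt minimum marks + min s (Rcnt minimum marks) := by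
  induction marks with
  | nil => intro s c hs; simp [Pcnt, Rcnt]; omega
  | cons x xs ih =>
    intro s c hs
    have hR := Rcnt_nonneg minimum xs
    simp only [List.foldl_cons]
    rw [stepA_classify, Pcnt_cons, Rcnt_cons]
    by_cases hp : 3 * minimum - 2 ≤ x
    · rw [if_pos hp]
      have hnr : ¬ (x = 3 * minimum - 4 ∨ (x = 3 * minimum - 3 ∧ 2 ≤ minimum)) := by omega
      rw [if_neg hnr, ih s (c + 1) hs, if_pos hp]
      omega
    · rw [if_neg hp]
      by_cases hq : x = 3 * minimum - 4 ∨ (x = 3 * minimum - 3 ∧ 2 ≤ minimum)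
      · rw [if_pos hq, if_pos hq]
        by_cases hs0 : s ≠ 0
        · rw [if_pos hs0, ih (s - 1) (c + 1) (by omega), if_neg hp]
          omega
        · rw [if_neg hs0, ih s c hs, if_neg hp]
          omega
      · rw [if_neg hq, if_neg hq, ih s c hs, if_neg hp]
        omega

-- B's value in terms of the proof-side tallies
theorem alt_eq (surprising minimum : Int) (marks : List Int) :
    solve_alt surprising minimum marks =
      Pcnt minimum marks + min surprising (Rcnt minimum marks) := by
  have hsplit : Rcnt minimum marks =
      (PySem.List.count marks (3 * minimum - 4) : Int) +
        (if minimum ≥ 2 then (PySem.List.count marks (3 * minimum - 3) : Int) else 0) := by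
    induction marks with
    | nil => simp [Rcnt]
    | cons x xs ih =>
      rw [Rcnt_cons, ih]
      simp only [PySem.List.count_eq, List.count_cons]
      by_cases hm : 2 ≤ minimum <;> split_ifs <;> simp_all <;> omega
  unfold solve_alt
  simp only [ge_iff_le, Pcnt]
  have h342 : (3 * minimum - 2) - 2 = 3 * minimum - 4 := by ring
  have h332 : (3 * minimum - 2) - 1 = 3 * minimum - 3 := by ring
  rw [h342, h332, hsplit]
  split_ifs <;> ring_nf

-- ===== VERDICT (by name: the statement is the Claim_ definition above) =====
theorem solve_spec : Claim_equal_solve := by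
  intro surprising minimum marks _ hpre
  unfold Spec_solve solve
  rw [alt_eq]
  simpa using loop_invariant minimum marks surprising 0 hpre
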